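-- pv_equiv track=rewrite | github.com/dimalei/advent_of_code_2024 | 1_historian_histeria/part1.py | similarity_score
-- ===== SOURCE A (Python) =====
-- def similarity_score(a: list, b: list) -> int:
--     score = 0
--     for id_a in a:
--         appearances = 0
--         for id_b in b:
--             if (id_a == id_b):
--                 appearances += 1
--         score += id_a * appearances
--     return score
-- ===== SOURCE B (Python) =====
-- from bisect import bisect_left, bisect_right
--
--
-- def similarity_score(a: list, b: list) -> int:
--     sorted_b = sorted(b)
--     score = 0
--     for id_a in a:
--         count = bisect_right(sorted_b, id_a) - bisect_left(sorted_b, id_a)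
--         score += id_a * count
--     return score
-- ===== Notes on version B (the rewrite author's own statement) =====
-- stated objective: faster
-- what changed: B sorts b once and counts each id's occurrences by binary search (bisect_right - bisect_left) instead of rescanning b for every element of a.
import Mathlib
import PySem

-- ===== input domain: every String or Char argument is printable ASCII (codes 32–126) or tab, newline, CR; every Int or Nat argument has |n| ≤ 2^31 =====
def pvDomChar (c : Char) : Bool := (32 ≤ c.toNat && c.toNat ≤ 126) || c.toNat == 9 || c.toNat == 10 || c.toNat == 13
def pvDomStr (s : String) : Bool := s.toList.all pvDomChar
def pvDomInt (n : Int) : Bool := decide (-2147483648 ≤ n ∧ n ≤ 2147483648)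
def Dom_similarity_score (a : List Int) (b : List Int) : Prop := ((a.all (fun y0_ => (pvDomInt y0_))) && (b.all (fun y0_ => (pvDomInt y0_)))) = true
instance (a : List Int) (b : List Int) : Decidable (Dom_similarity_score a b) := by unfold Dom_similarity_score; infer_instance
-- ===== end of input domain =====

-- B sorts b once and counts each element of a in b by binary search (bisect_right - bisect_left)
-- instead of rescanning b for every element of a (objective: faster, asymptotic).


-- ===== PORT A =====
-- nested loops: for each id_a, scan b counting equal elements, add id_a * appearances
def similarity_score (a : List Int) (b : List Int) : Int :=
  a.foldl (fun score id_a =>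
    let appearances : Int :=
      b.foldl (fun app id_b => if id_a == id_b then app + 1 else app) 0
    score + id_a * appearances) 0

-- ===== PORT B =====
-- sorted_b = sorted(b); count = bisect_right(sorted_b, id_a) - bisect_left(sorted_b, id_a)
def similarity_score_alt (a : List Int) (b : List Int) : Int :=
  let sorted_b := PySem.List.sorted b (fun x => x)
  a.foldl (fun score id_a =>
    score + id_a *
      ((PySem.List.bisectRight sorted_b id_a : Int) - (PySem.List.bisectLeft sorted_b id_a : Int))) 0

-- ===== PRECONDITION & SPEC =====
def Spec_similarity_score (a : List Int) (b : List Int) (out : Int) : Prop := out = similarity_score_alt a b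
instance (a : List Int) (b : List Int) (out : Int) : Decidable (Spec_similarity_score a b out) := by unfold Spec_similarity_score; infer_instance

-- ===== CLAIM (what is proved, stated in full; the proofs are below) =====
def Claim_equal_similarity_score : Prop := ∀ (a : List Int) (b : List Int), Dom_similarity_score a b → Spec_similarity_score a b (similarity_score a b)

-- ===== LEMMAS AND PROOFS =====

-- a list whose first r positions satisfy P and whose remaining positions do not has countP P = r
theorem countP_of_split (s : List Int) (P : Int → Bool) (r : Nat) (hr : r ≤ s.length)
    (h1 : ∀ j (hj : j < s.length), j < r → P s[j])
    (h2 : ∀ j (hj : j < s.length), r ≤ j → ¬ P s[j]) : s.countP P = r := by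
  induction s generalizing r with
  | nil => simp at hr ⊢; omega
  | cons y t ih =>
    cases r with
    | zero =>
      have hy : ¬ P y := h2 0 (by simp) (Nat.zero_le _)
      have : t.countP P = 0 := by
        apply ih 0 (Nat.zero_le _) (by omega)
        intro j hj _
        exact h2 (j + 1) (by simpa using Nat.succ_lt_succ hj) (Nat.zero_le _)
      simp [hy, this]
    | succ r' =>
      have hy : P y := h1 0 (by simp) (Nat.succ_pos _)
      have : t.countP P = r' := by
        apply ih r' (by simpa using hr)
        · intro j hj hjr
          exact h1 (j + 1) (by simpa using Nat.succ_lt_succ hj) (Nat.succ_lt_succ hjr)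
        · intro j hj hjr
          exact h2 (j + 1) (by simpa using Nat.succ_lt_succ hj) (Nat.succ_le_succ hjr)
      simp [hy, this]

theorem bisectLeft_eq_countP (s : List Int) (x : Int) (hs : s.Pairwise (· ≤ ·)) :
    PySem.List.bisectLeft s x = s.countP (fun y => decide (y < x)) := by
  obtain ⟨hle, h1, h2⟩ := PySem.List.bisectLeft_spec s x hs
  refine (countP_of_split s _ _ hle ?_ ?_).symm
  · intro j hj hjr; simpa using h1 j hj hjr
  · intro j hj hjr; simpa using h2 j hj hjr

theorem bisectRight_eq_countP (s : List Int) (x : Int) (hs : s.Pairwise (· ≤ ·)) :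
    PySem.List.bisectRight s x = s.countP (fun y => decide (y ≤ x)) := by
  obtain ⟨hle, h1, h2⟩ := PySem.List.bisectRight_spec s x hs
  refine (countP_of_split s _ _ hle ?_ ?_).symm
  · intro j hj hjr; simpa using h1 j hj hjr
  · intro j hj hjr; simpa using not_le.mpr (h2 j hj hjr)

theorem countP_le_split (s : List Int) (x : Int) :
    s.countP (fun y => decide (y ≤ x)) =
      s.countP (fun y => decide (y < x)) + s.count x := by
  induction s with
  | nil => simp
  | cons y t ih =>
    simp only [List.countP_cons, List.count_cons, ih]
    by_cases h : y = x
    · simp [h]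
      omega
    · by_cases hlt : y < x
      · simp [hlt, le_of_lt hlt, h]
        omega
      · have hx : x ≤ y := le_of_not_gt hlt
        have hnle : ¬ y ≤ x := fun hc => h (le_antisymm hc hx)
        simp [hlt, hnle, h]

-- per-element count: bisect difference on sorted b equals A's inner scan count of x in b
theorem bisect_diff_eq_count (b : List Int) (x : Int) :
    (PySem.List.bisectRight (PySem.List.sorted b (fun y => y)) x : Int) -
      (PySem.List.bisectLeft (PySem.List.sorted b (fun y => y)) x : Int) = b.count x := by
  set s := PySem.List.sorted b (fun y => y) with hsdef
  have hs : s.Pairwise (· ≤ ·) := by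
    simpa using PySem.List.sorted_pairwise (xs := b) (key := fun y => y)
  have hperm : s.Perm b := PySem.List.sorted_perm b (fun y => y) false
  have hcnt : s.count x = b.count x := hperm.count_eq x
  rw [bisectLeft_eq_countP s x hs, bisectRight_eq_countP s x hs, countP_le_split s x, ← hcnt]
  push_cast
  ring

theorem inner_scan_eq_count (b : List Int) (x : Int) (n : Int) :
    b.foldl (fun app id_b => if x == id_b then app + 1 else app) n = n + b.count x := by
  induction b generalizing n with
  | nil => simp
  | cons y t ih =>
    simp only [List.foldl_cons, List.count_cons, ih]
    by_cases h : x = y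
    · simp [h]
      omega
    · have h1 : (x == y) = false := by simp [h]
      have h2 : (y == x) = false := by simp [Ne.symm h]
      simp [h1, h2]

-- ===== VERDICT (by name: the statement is the Claim_ definition above) =====
theorem similarity_score_spec : Claim_equal_similarity_score := by
  intro a b _
  unfold Spec_similarity_score similarity_score similarity_score_alt
  have hfun :
      (fun (score id_a : Int) =>
        score + id_a * (b.foldl (fun app id_b => if id_a == id_b then app + 1 else app) 0)) =
      (fun (score id_a : Int) =>
        score + id_a *
          ((PySem.List.bisectRight (PySem.List.sorted b (fun x => x)) id_a : Int) -
            (PySem.List.bisectLeft (PySem.List.sorted b (fun x => x)) id_a : Int))) := by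
    funext score x
    rw [inner_scan_eq_count, bisect_diff_eq_count]
    ring
  simp only [hfun]
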